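-- pv_equiv track=rewrite | github.com/RaoMitesh21/CareerLens | careerlens-backend/app/services/roadmap_quality.py | _phase_spans
-- ===== SOURCE A (Python) =====
-- from typing import Dict, List, Tuple
--
-- def _phase_spans(total_months: int, phase_count: int) -> List[str]:
--     """Create contiguous month ranges per phase."""
--     if phase_count <= 0:
--         return []
--
--     each = total_months // phase_count
--     remainder = total_months % phase_count
--
--     spans: List[str] = []
--     start = 1
--     for i in range(phase_count):
--         extra = 1 if i < remainder else 0
--         length = each + extra
--         end = start + length - 1
--         spans.append(f"Months {start}-{end}")
--         start = end + 1
--     return spans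
-- ===== SOURCE B (Python) =====
-- from typing import Dict, List, Tuple
--
-- def _phase_spans(total_months: int, phase_count: int) -> List[str]:
--     """Create contiguous month ranges per phase (closed-form per-index bounds)."""
--     if phase_count <= 0:
--         return []
--     each = total_months // phase_count
--     remainder = total_months % phase_count
--     return [
--         f"Months {i * each + min(i, remainder) + 1}-{(i + 1) * each + min(i + 1, remainder)}"
--         for i in range(phase_count)
--     ]
-- ===== Notes on version B (the rewrite author's own statement) =====
-- stated objective: alternative
-- what changed: Replaces the loop that threads a mutable running start (and appends to a spans accumulator) with a stateless list comprehension computing each phase's start/end directly from its index via the closed-form cumulative offset i*each + min(i, remainder).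
import Mathlib
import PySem

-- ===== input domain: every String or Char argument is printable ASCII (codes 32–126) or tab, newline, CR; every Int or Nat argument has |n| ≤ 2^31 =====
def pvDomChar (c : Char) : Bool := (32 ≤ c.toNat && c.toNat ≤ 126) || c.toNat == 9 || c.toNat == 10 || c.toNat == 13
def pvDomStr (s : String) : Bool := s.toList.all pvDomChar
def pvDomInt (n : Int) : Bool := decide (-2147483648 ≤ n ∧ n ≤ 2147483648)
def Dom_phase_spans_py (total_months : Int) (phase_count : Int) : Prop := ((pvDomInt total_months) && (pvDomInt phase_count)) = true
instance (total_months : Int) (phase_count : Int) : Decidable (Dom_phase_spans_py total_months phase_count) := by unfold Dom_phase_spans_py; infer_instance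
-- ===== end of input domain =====

-- B replaces A's threaded running-start accumulator with a stateless per-index closed-form
-- for each phase's bounds (alternative decomposition, same O(n) cost).

-- ===== PORT A =====
def phase_spans_py (total_months : Int) (phase_count : Int) : List String :=
  if phase_count ≤ 0 then []
  else
    let each := PySem.Int.floordiv total_months phase_count
    let remainder := PySem.Int.mod total_months phase_count
    let res := (PySem.List.pyRange 0 phase_count 1).foldl
      (fun (st : List String × Int) i =>
        let extra : Int := if i < remainder then 1 else 0
        let length := each + extra
        let e := st.2 + length - 1
        (st.1 ++ ["Months " ++ PySem.Int.toStr st.2 ++ "-" ++ PySem.Int.toStr e], e + 1))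
      ([], 1)
    res.1

-- ===== PORT B =====
def phase_spans_py_alt (total_months : Int) (phase_count : Int) : List String :=
  if phase_count ≤ 0 then []
  else
    let each := PySem.Int.floordiv total_months phase_count
    let remainder := PySem.Int.mod total_months phase_count
    (PySem.List.pyRange 0 phase_count 1).map (fun i =>
      "Months " ++ PySem.Int.toStr (i * each + min i remainder + 1) ++ "-"
        ++ PySem.Int.toStr ((i + 1) * each + min (i + 1) remainder))

-- ===== PRECONDITION & SPEC =====
def Spec_phase_spans_py (total_months : Int) (phase_count : Int) (out : List String) : Prop := out = phase_spans_py_alt total_months phase_count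
instance (total_months : Int) (phase_count : Int) (out : List String) : Decidable (Spec_phase_spans_py total_months phase_count out) := by unfold Spec_phase_spans_py; infer_instance

-- ===== CLAIM (what is proved, stated in full; the proofs are below) =====
def Claim_equal_phase_spans_py : Prop := ∀ (total_months : Int) (phase_count : Int), Dom_phase_spans_py total_months phase_count → Spec_phase_spans_py total_months phase_count (phase_spans_py total_months phase_count)

-- ===== LEMMAS AND PROOFS =====

-- closed-form start of phase i
def pvCS (each r i : Int) : Int := i * each + min i r + 1

lemma pvCS_step (each r k : Int) :
    pvCS each r k + (each + (if k < r then (1:Int) else 0)) - 1 + 1 = pvCS each r (k + 1) := by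
  unfold pvCS
  rcases lt_or_ge k r with h | h
  · rw [if_pos h, min_eq_left h.le, min_eq_left (by omega : k + 1 ≤ r)]; ring
  · rw [if_neg (not_lt.mpr h), min_eq_right h, min_eq_right (by omega : r ≤ k + 1)]; ring

lemma pvLoop (each r : Int) : ∀ (n : Nat) (k : Int) (acc : List String),
    ((PySem.List.pyRange k (k + n) 1).foldl
      (fun (st : List String × Int) i =>
        let extra : Int := if i < r then 1 else 0
        let length := each + extra
        let e := st.2 + length - 1
        (st.1 ++ ["Months " ++ PySem.Int.toStr st.2 ++ "-" ++ PySem.Int.toStr e], e + 1))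
      (acc, pvCS each r k)).1
    = acc ++ (PySem.List.pyRange k (k + n) 1).map (fun i =>
        "Months " ++ PySem.Int.toStr (i * each + min i r + 1) ++ "-"
          ++ PySem.Int.toStr ((i + 1) * each + min (i + 1) r)) := by
  intro n
  induction n with
  | zero =>
      intro k acc
      rw [PySem.List.pyRange_one_eq_nil (by omega)]
      simp
  | succ m ih =>
      intro k acc
      rw [PySem.List.pyRange_one_cons (by omega : k < k + (m + 1 : Nat))]
      simp only [List.foldl_cons, List.map_cons]
      have hend : pvCS each r k + (each + (if k < r then (1:Int) else 0)) - 1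
          = (k + 1) * each + min (k + 1) r := by
        have := pvCS_step each r k
        unfold pvCS at this ⊢
        omega
      have harr : k + (m + 1 : Nat) = (k + 1) + (m : Nat) := by push_cast; ring
      rw [harr, pvCS_step each r k,
        ih (k + 1) (acc ++ ["Months " ++ PySem.Int.toStr (pvCS each r k) ++ "-"
          ++ PySem.Int.toStr (pvCS each r k + (each + (if k < r then (1:Int) else 0)) - 1)]),
        hend]
      simp [pvCS, List.append_assoc]

-- ===== VERDICT (by name: the statement is the Claim_ definition above) =====
theorem phase_spans_py_spec : Claim_equal_phase_spans_py := by
  intro tm pc _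
  unfold Spec_phase_spans_py phase_spans_py phase_spans_py_alt
  by_cases h : pc ≤ 0
  · simp [h]
  · rw [if_neg h, if_neg h]
    have hr : (0:Int) ≤ PySem.Int.mod tm pc := by
      rw [PySem.Int.mod_eq_emod_of_pos (by omega)]
      exact Int.emod_nonneg tm (by omega)
    have hcs : pvCS (PySem.Int.floordiv tm pc) (PySem.Int.mod tm pc) 0 = 1 := by
      unfold pvCS
      rw [min_eq_left hr]
      ring
    have hpc : (0:Int) + (pc.toNat : Int) = pc := by omega
    have := pvLoop (PySem.Int.floordiv tm pc) (PySem.Int.mod tm pc) pc.toNat 0 []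
    rw [hcs, hpc] at this
    simpa using this
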